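-- pv_equiv track=rewrite | github.com/devd30/python_tries | python_test/codility questions.py | bin_gap
-- ===== SOURCE A (Python) =====
-- def bin_gap(N):
--     s=str(bin(N).strip("0b"))
--     #print (s)
--
--     zero=0
--     temp=0
--
--     for i in range(len(s)):
--         if s[i] == '0':
--             zero += 1
--         else:
--             if temp < zero:
--                 #print (temp,"212",zero)
--                 temp = zero
--             zero = 0
--     return temp
-- ===== SOURCE B (Python) =====
-- def bin_gap(N):
--     s = bin(N).strip("0b")
--     k = 0
--     while "0" * (k + 1) in s:
--         k += 1
--     return k
-- ===== Notes on version B (the rewrite author's own statement) =====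
-- stated objective: alternative
-- what changed: A counts consecutive '0' characters in one stateful pass (zero/temp counters); B instead grows k while the substring '0'*(k+1) still occurs in the stripped binary string, so the answer is found by substring search rather than run counting.
import Mathlib
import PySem

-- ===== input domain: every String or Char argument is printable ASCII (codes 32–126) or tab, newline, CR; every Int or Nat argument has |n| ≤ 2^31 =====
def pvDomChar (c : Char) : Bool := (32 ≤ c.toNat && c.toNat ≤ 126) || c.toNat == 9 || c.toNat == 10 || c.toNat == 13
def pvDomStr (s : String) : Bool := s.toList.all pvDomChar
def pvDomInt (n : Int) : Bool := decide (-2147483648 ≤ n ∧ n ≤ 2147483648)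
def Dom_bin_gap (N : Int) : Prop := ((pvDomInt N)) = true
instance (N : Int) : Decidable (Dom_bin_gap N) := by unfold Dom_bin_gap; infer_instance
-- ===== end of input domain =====

-- ===== PORT A =====
-- B changes the scan: instead of A's single pass counting zero runs, B grows k while "0"*(k+1)
-- is a substring of s (objective: simpler).
-- shared line of both Pythons: s = str(bin(N).strip("0b"))
def pvBinStrip (N : Int) : List Char :=
  PySem.Chars.stripChars (PySem.Int.toBinChars0b N) ['0', 'b']

-- A's loop body: state (zero, temp)
def binGapStep (st : Int × Int) (c : Char) : Int × Int :=
  if c = '0' then (st.1 + 1, st.2)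
  else (0, if st.2 < st.1 then st.1 else st.2)

def bin_gap (N : Int) : Int :=
  ((pvBinStrip N).foldl binGapStep (0, 0)).2

-- ===== PORT B =====
-- B's while loop: k += 1 while "0" * (k + 1) in s
def altLoop (s : List Char) (k : Nat) : Int :=
  if h : PySem.Chars.isIn (List.replicate (k + 1) '0') s then altLoop s (k + 1) else (k : Int)
termination_by s.length + 1 - k
decreasing_by
  have := (PySem.Chars.isIn_iff_infix (List.replicate (k + 1) '0') s).mp h
  have hl := this.length_le
  simp [List.length_replicate] at hl
  omega

def bin_gap_alt (N : Int) : Int :=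
  altLoop (pvBinStrip N) 0

-- ===== PRECONDITION & SPEC =====
def Spec_bin_gap (N : Int) (out : Int) : Prop := out = bin_gap_alt N
instance (N : Int) (out : Int) : Decidable (Spec_bin_gap N out) := by unfold Spec_bin_gap; infer_instance

-- ===== CLAIM (what is proved, stated in full; the proofs are below) =====
def Claim_equal_bin_gap : Prop := ∀ (N : Int), Dom_bin_gap N → Spec_bin_gap N (bin_gap N)

-- ===== LEMMAS AND PROOFS =====

-- length of the leading run of '0's
def lead : List Char → Nat
  | [] => 0
  | c :: t => if c = '0' then lead t + 1 else 0

-- length of the longest run of '0's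
def mrun : List Char → Nat
  | [] => 0
  | c :: t => max (lead (c :: t)) (mrun t)

-- A's accumulator temp, as a function of the remaining list and the current zero count
def hfun : List Char → Int → Int
  | [], _ => 0
  | c :: t, z => if c = '0' then hfun t (z + 1) else max z (hfun t 0)

lemma lead_le_mrun (l : List Char) : lead l ≤ mrun l := by
  cases l with
  | nil => simp [lead, mrun]
  | cons c t => simp [mrun]

lemma foldl_binGapStep (l : List Char) : ∀ (z t : Int), 0 ≤ t →
    (l.foldl binGapStep (z, t)).2 = max t (hfun l z) := by
  induction l with
  | nil => intro z t ht; simp [hfun]; omega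
  | cons c l ih =>
    intro z t ht
    by_cases hc : c = '0'
    · rw [List.foldl_cons]
      simp only [binGapStep, hfun, hc]
      exact ih (z + 1) t ht
    · rw [List.foldl_cons]
      simp only [binGapStep, hfun, if_neg hc]
      rw [ih 0 (if t < z then z else t) (by omega)]
      have : (if t < z then z else t) = max t z := by simp [max_def]; omega
      rw [this, max_assoc]

-- the last character of s is never '0' (strip removed trailing '0's), so A completes every run
lemma lead_cons (c : Char) (t : List Char) :
    lead (c :: t) = if c = '0' then lead t + 1 else 0 := rfl

lemma mrun_cons (c : Char) (t : List Char) :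
    mrun (c :: t) = max (lead (c :: t)) (mrun t) := rfl

lemma hfun_cons (c : Char) (t : List Char) (z : Int) :
    hfun (c :: t) z = if c = '0' then hfun t (z + 1) else max z (hfun t 0) := rfl

-- the last character of s is never '0' (strip removed trailing '0's), so A completes every run
lemma hfun_no_trailing (l : List Char) (hl : l ≠ [] → l.getLast? ≠ some '0') :
    ∀ z : Int, 0 ≤ z →
      hfun l z = if l = [] then 0 else max (z + (lead l : Int)) ((mrun l : Int)) := by
  induction l with
  | nil => intro z _; simp [hfun]
  | cons c t ih =>
    intro z hz
    cases t with
    | nil =>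
      have hc : c ≠ '0' := by
        intro h; exact (hl (by simp)) (by simp [h])
      rw [hfun_cons, if_neg hc, if_neg (by simp : ¬([c] = []))]
      simp [hfun, hc, mrun, lead]
    | cons d u =>
      have ht : d :: u ≠ [] → (d :: u).getLast? ≠ some '0' := by
        intro _; have := hl (by simp)
        rwa [List.getLast?_cons_cons] at this
      have hle : (lead (d :: u) : Int) ≤ (mrun (d :: u) : Int) := by
        exact_mod_cast lead_le_mrun (d :: u)
      rw [hfun_cons, if_neg (by simp : ¬(c :: d :: u = []))]
      by_cases hc : c = '0'
      · rw [if_pos hc, ih ht (z + 1) (by omega), if_neg (by simp : ¬(d :: u = []))]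
        simp [lead_cons, mrun_cons, max_def, hc]
        split_ifs <;> omega
      · rw [if_neg hc, ih ht 0 (by omega), if_neg (by simp : ¬(d :: u = []))]
        simp [lead_cons, mrun_cons, max_def, hc]
        split_ifs <;> omega

lemma getLast?_pvBinStrip (N : Int) : pvBinStrip N ≠ [] → (pvBinStrip N).getLast? ≠ some '0' := by
  intro _ h
  unfold pvBinStrip PySem.Chars.stripChars at h
  rw [List.getLast?_reverse] at h
  have h2 := List.head?_dropWhile_not (fun c => (['0', 'b'] : List Char).contains c)
    (List.dropWhile (fun c => (['0', 'b'] : List Char).contains c)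
      (PySem.Int.toBinChars0b N)).reverse
  rw [h] at h2
  simp at h2

lemma bin_gap_eq_mrun (N : Int) : bin_gap N = (mrun (pvBinStrip N) : Int) := by
  unfold bin_gap
  rw [foldl_binGapStep _ 0 0 le_rfl,
    hfun_no_trailing (pvBinStrip N) (getLast?_pvBinStrip N) 0 le_rfl]
  by_cases he : pvBinStrip N = []
  · simp [he, mrun]
  · rw [if_neg he]
    have hle : (lead (pvBinStrip N) : Int) ≤ (mrun (pvBinStrip N) : Int) := by
      exact_mod_cast lead_le_mrun _
    simp [max_def]
    split_ifs <;> omega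

lemma replicate_prefix_iff (l : List Char) : ∀ (j : Nat), 0 < j →
    (List.replicate j '0' <+: l ↔ j ≤ lead l) := by
  induction l with
  | nil =>
    intro j hj
    simp [lead, List.replicate_eq_nil_iff]
  | cons c t ih =>
    intro j hj
    obtain ⟨j', rfl⟩ : ∃ j', j = j' + 1 := ⟨j - 1, by omega⟩
    rw [List.replicate_succ, List.cons_prefix_cons]
    by_cases hc : c = '0'
    · subst hc
      rw [lead_cons, if_pos rfl]
      simp only [true_and]
      rcases Nat.eq_zero_or_pos j' with h0 | hpos
      · subst h0; simp
      · rw [ih j' hpos]; omega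
    · rw [lead_cons, if_neg hc]
      constructor
      · rintro ⟨h, -⟩; exact absurd h.symm hc
      · intro h; exact absurd h (by omega)

lemma replicate_infix_iff (l : List Char) : ∀ (j : Nat), 0 < j →
    (List.replicate j '0' <:+: l ↔ j ≤ mrun l) := by
  induction l with
  | nil =>
    intro j hj
    simp [mrun, List.replicate_eq_nil_iff]
  | cons c t ih =>
    intro j hj
    rw [List.infix_cons_iff, replicate_prefix_iff (c :: t) j hj, ih j hj, mrun_cons]
    exact (le_max_iff).symm

lemma altLoop_eq_mrun (s : List Char) : ∀ (n k : Nat), mrun s - k ≤ n → k ≤ mrun s →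
    altLoop s k = (mrun s : Int) := by
  intro n
  induction n with
  | zero =>
    intro k h1 h2
    have hk : k = mrun s := by omega
    subst hk
    have hni : ¬ PySem.Chars.isIn (List.replicate (mrun s + 1) '0') s := by
      intro hin
      have := (replicate_infix_iff s (mrun s + 1) (by omega)).mp
        ((PySem.Chars.isIn_iff_infix _ _).mp hin)
      omega
    rw [altLoop]
    simp [hni]
  | succ n ih =>
    intro k h1 h2
    rw [altLoop]
    by_cases hin : PySem.Chars.isIn (List.replicate (k + 1) '0') s
    · have hle := (replicate_infix_iff s (k + 1) (by omega)).mp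
        ((PySem.Chars.isIn_iff_infix _ _).mp hin)
      simp only [hin, dif_pos]
      exact ih (k + 1) (by omega) hle
    · have hnle : ¬ (k + 1) ≤ mrun s := by
        intro hle
        exact hin ((PySem.Chars.isIn_iff_infix _ _).mpr
          ((replicate_infix_iff s (k + 1) (by omega)).mpr hle))
      have hk : k = mrun s := by omega
      subst hk
      simp [hin]

-- ===== VERDICT (by name: the statement is the Claim_ definition above) =====
theorem bin_gap_spec : Claim_equal_bin_gap := by
  intro N _
  unfold Spec_bin_gap bin_gap_alt
  rw [bin_gap_eq_mrun, altLoop_eq_mrun (pvBinStrip N) (mrun (pvBinStrip N)) 0 (by omega) (by omega)]
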